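-- pv_equiv track=rewrite | github.com/ABlairJamieson/SpatialFilter | plot_spot.py | preprocess_argv
-- ===== SOURCE A (Python) =====
-- def preprocess_argv(argv: list[str]) -> list[str]:
--     """
--     Support convenient user forms like:
--       -x=(-1,1)
--       -y=(-1,1)
--       -l=false
--       -c=0.99
--     by rewriting them to argparse-friendly long options.
--     """
--     out: list[str] = []
--     for arg in argv:
--         if arg.startswith("-x="):
--             out.extend(["--xrange_text", arg.split("=", 1)[1]])
--         elif arg.startswith("-y="):
--             out.extend(["--yrange_text", arg.split("=", 1)[1]])
--         elif arg.startswith("-l="):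
--             out.extend(["--log", arg.split("=", 1)[1]])
--         elif arg.startswith("-c="):
--             out.extend(["--contour", arg.split("=", 1)[1]])
--         else:
--             out.append(arg)
--     return out
-- ===== SOURCE B (Python) =====
-- RULES = [("-x=", "--xrange_text"), ("-y=", "--yrange_text"),
--          ("-l=", "--log"), ("-c=", "--contour")]
--
--
-- def _rewrite(arg, rules):
--     """First-match recursion over the rules table: on a matching prefix,
--     emit the long option and the text after the prefix; otherwise recurse."""
--     if not rules:
--         return [arg]
--     prefix, long_opt = rules[0]
--     if arg.startswith(prefix):
--         return [long_opt, arg[len(prefix):]]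
--     return _rewrite(arg, rules[1:])
--
--
-- def preprocess_argv(argv: list[str]) -> list[str]:
--     return [piece for arg in argv for piece in _rewrite(arg, RULES)]
-- ===== Notes on version B (the rewrite author's own statement) =====
-- stated objective: alternative
-- what changed: Replaces A's hardcoded four-way startswith/split('=',1) ladder inside an accumulator loop by a data-driven design: a rules table of (prefix, long-option) pairs scanned by a recursive first-match helper that slices off len(prefix), with the output built as a flat comprehension over argv instead of an accumulator loop.
import Mathlib
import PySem

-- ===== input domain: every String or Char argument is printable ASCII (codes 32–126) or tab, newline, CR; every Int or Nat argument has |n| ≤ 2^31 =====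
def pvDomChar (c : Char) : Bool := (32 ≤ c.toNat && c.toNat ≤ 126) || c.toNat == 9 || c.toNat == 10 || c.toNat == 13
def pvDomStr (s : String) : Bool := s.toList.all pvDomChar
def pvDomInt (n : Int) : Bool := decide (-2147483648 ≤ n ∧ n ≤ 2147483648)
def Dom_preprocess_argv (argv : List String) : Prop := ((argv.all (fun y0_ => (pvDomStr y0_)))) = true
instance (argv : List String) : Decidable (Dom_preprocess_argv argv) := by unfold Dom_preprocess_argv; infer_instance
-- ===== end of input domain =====

-- B replaces A's hardcoded startswith/split ladder in an accumulator loop by a recursive first-match scan over a (prefix, long-option) rules table, flat-mapped over argv (alternative decomposition, same cost).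


-- ===== PORT A =====
-- arg.split("=", 1)[1]: the [1] access is guarded by startswith("-?="), so the piece always exists
-- and the .getD defaults are never taken (sep "=" is nonempty, the split has ≥ 2 pieces).
def pvSplitTail (arg : String) : String :=
  PySem.List.pyGetD ((PySem.Str.splitMax? arg "=" 1).getD []) 1 ""

def preprocess_argv (argv : List String) : List String :=
  argv.foldl (fun out arg =>
    if PySem.Str.startswith arg "-x=" then out ++ ["--xrange_text", pvSplitTail arg]
    else if PySem.Str.startswith arg "-y=" then out ++ ["--yrange_text", pvSplitTail arg]
    else if PySem.Str.startswith arg "-l=" then out ++ ["--log", pvSplitTail arg]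
    else if PySem.Str.startswith arg "-c=" then out ++ ["--contour", pvSplitTail arg]
    else out ++ [arg]) []

-- ===== PORT B =====
def pvRules : List (String × String) :=
  [("-x=","--xrange_text"),("-y=","--yrange_text"),("-l=","--log"),("-c=","--contour")]

-- _rewrite: first-match recursion over the rules table; arg[len(prefix):] is Str.slice from len(prefix).
def pvRewrite (arg : String) : List (String × String) → List String
  | [] => [arg]
  | (pre, long) :: rest =>
    if PySem.Str.startswith arg pre then [long, PySem.Str.slice arg (some (PySem.Str.len pre)) none]
    else pvRewrite arg rest

def preprocess_argv_alt (argv : List String) : List String :=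
  argv.flatMap (fun arg => pvRewrite arg pvRules)

-- ===== PRECONDITION & SPEC =====
def Spec_preprocess_argv (argv : List String) (out : List String) : Prop := out = preprocess_argv_alt argv
instance (argv : List String) (out : List String) : Decidable (Spec_preprocess_argv argv out) := by unfold Spec_preprocess_argv; infer_instance

-- ===== CLAIM (what is proved, stated in full; the proofs are below) =====
def Claim_equal_preprocess_argv : Prop := ∀ (argv : List String), Dom_preprocess_argv argv → Spec_preprocess_argv argv (preprocess_argv argv)

-- ===== LEMMAS AND PROOFS =====
-- A's per-argument contribution (the body of A's loop, as a flatMap step).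
def pvStepA (arg : String) : List String :=
  if PySem.Str.startswith arg "-x=" then ["--xrange_text", pvSplitTail arg]
  else if PySem.Str.startswith arg "-y=" then ["--yrange_text", pvSplitTail arg]
  else if PySem.Str.startswith arg "-l=" then ["--log", pvSplitTail arg]
  else if PySem.Str.startswith arg "-c=" then ["--contour", pvSplitTail arg]
  else [arg]

theorem pv_go_m_zero (sep : List Char) (fuel : Nat) (l cur : List Char) (acc : List (List Char)) :
    PySem.Chars.splitOnMax.go sep fuel 0 l cur acc = ((cur.reverse ++ l) :: acc).reverse := by
  cases fuel with
  | zero => simp [PySem.Chars.splitOnMax.go]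
  | succ n => cases l <;> simp [PySem.Chars.splitOnMax.go]

-- On an argument of shape "-?=rest" (? ≠ '='), A's split tail and B's slice-from-3 agree.
theorem pv_pos_parts (arg : String) (c : Char) (t : List Char) (hc : c ≠ '=')
    (h : arg.toList = '-'::c::'='::t) :
    PySem.Str.slice arg (some 3) none = String.ofList t ∧
    pvSplitTail arg = String.ofList t := by
  constructor
  · rw [PySem.Str.slice, h, PySem.Chars.slice, PySem.List.slice_from _ (by norm_num)]
    simp [List.drop_succ_cons]
  · simp [pvSplitTail, PySem.Str.splitMax?, PySem.Chars.splitMax?, h,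
      PySem.Chars.splitOnMax, PySem.Chars.splitOnMax.go, pv_go_m_zero, Ne.symm hc,
      PySem.List.pyGetD, PySem.List.pyGet?, PySem.List.pyIdx?]

-- per-argument equality of the two rewrites
theorem pv_step_eq (arg : String) : pvStepA arg = pvRewrite arg pvRules := by
  have tail_eq : ∀ (c : Char) (t : List Char), c ≠ '=' → arg.toList = '-'::c::'='::t →
      pvSplitTail arg = PySem.Str.slice arg (some 3) none := by
    intro c t hc h
    obtain ⟨h1, h2⟩ := pv_pos_parts arg c t hc h
    rw [h1, h2]
  have hlen : ∀ (p : String), p.toList.length = 3 → (PySem.Str.len p : Int) = 3 := by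
    intro p hp
    simp [PySem.Str.len_eq, hp]
  simp only [pvStepA, pvRewrite, pvRules]
  by_cases hx : PySem.Str.startswith arg "-x=" = true
  · rw [if_pos hx, if_pos hx]
    obtain ⟨t, ht⟩ := (PySem.Chars.startswith_iff _ _).mp (by rw [← PySem.Str.startswith_eq]; exact hx)
    rw [tail_eq 'x' t (by decide) (by rw [← ht]; rfl), hlen _ (by decide)]
  · rw [if_neg hx, if_neg hx]
    by_cases hy : PySem.Str.startswith arg "-y=" = true
    · rw [if_pos hy, if_pos hy]
      obtain ⟨t, ht⟩ := (PySem.Chars.startswith_iff _ _).mp (by rw [← PySem.Str.startswith_eq]; exact hy)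
      rw [tail_eq 'y' t (by decide) (by rw [← ht]; rfl), hlen _ (by decide)]
    · rw [if_neg hy, if_neg hy]
      by_cases hl : PySem.Str.startswith arg "-l=" = true
      · rw [if_pos hl, if_pos hl]
        obtain ⟨t, ht⟩ := (PySem.Chars.startswith_iff _ _).mp (by rw [← PySem.Str.startswith_eq]; exact hl)
        rw [tail_eq 'l' t (by decide) (by rw [← ht]; rfl), hlen _ (by decide)]
      · rw [if_neg hl, if_neg hl]
        by_cases hc : PySem.Str.startswith arg "-c=" = true
        · rw [if_pos hc, if_pos hc]
          obtain ⟨t, ht⟩ := (PySem.Chars.startswith_iff _ _).mp (by rw [← PySem.Str.startswith_eq]; exact hc)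
          rw [tail_eq 'c' t (by decide) (by rw [← ht]; rfl), hlen _ (by decide)]
        · rw [if_neg hc, if_neg hc]

theorem pv_fold_eq (argv : List String) :
    preprocess_argv argv = preprocess_argv_alt argv := by
  have ha : preprocess_argv argv = [] ++ argv.flatMap pvStepA := by
    rw [preprocess_argv, show
        (fun (out : List String) (arg : String) =>
          if PySem.Str.startswith arg "-x=" then out ++ ["--xrange_text", pvSplitTail arg]
          else if PySem.Str.startswith arg "-y=" then out ++ ["--yrange_text", pvSplitTail arg]
          else if PySem.Str.startswith arg "-l=" then out ++ ["--log", pvSplitTail arg]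
          else if PySem.Str.startswith arg "-c=" then out ++ ["--contour", pvSplitTail arg]
          else out ++ [arg]) = (fun out arg => out ++ pvStepA arg) from by
        funext out arg
        simp only [pvStepA]
        split_ifs <;> rfl,
      PySem.List.foldl_append_eq_flatMap]
  rw [ha, preprocess_argv_alt, List.nil_append]
  exact congrArg (fun f => List.flatMap f argv) (funext pv_step_eq)

-- ===== VERDICT (by name: the statement is the Claim_ definition above) =====
theorem preprocess_argv_spec : Claim_equal_preprocess_argv := by
  intro argv _
  unfold Spec_preprocess_argv
  exact pv_fold_eq argv
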